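-- pv_equiv track=rewrite | github.com/oogles/aoc_2023 | solutions/day04/solvers.py | part2
-- ===== SOURCE A (Python) =====
-- def part2(cards):
--
--     # Keep a count of the number of cards won by each card
--     counts = {}
--
--     def process_card(index):
--
--         # If this card has already been fully processed, return the known count
--         if index in counts:
--             return counts[index]
--
--         winning_numbers, present_numbers = cards[index]
--         matches = len(winning_numbers & present_numbers)
--
--         count = 1  # start with the original card
--
--         for i in range(matches):
--             count += process_card(index + i + 1)
--
--         counts[index] = count
--
--         return count
--
--     for i in range(len(cards)):
--         process_card(i)
--
--     return sum(counts.values())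
-- ===== SOURCE B (Python) =====
-- def part2(cards):
--     # Backward dynamic programming: totals[i] = number of cards ultimately
--     # produced by one copy of card i (itself included). Processing from the
--     # last card to the first, every totals[i + k + 1] is already final.
--     n = len(cards)
--     totals = [0] * n
--     for i in range(n - 1, -1, -1):
--         winning_numbers, present_numbers = cards[i]
--         matches = len(winning_numbers & present_numbers)
--         total = 1
--         for k in range(matches):
--             total += totals[i + k + 1]
--         totals[i] = total
--     return sum(totals)
-- ===== Notes on version B (the rewrite author's own statement) =====
-- stated objective: simpler
-- what changed: Replaces A's memoized top-down recursion with a nested closure and a dict by a single backward iterative DP pass over a plain array, summed at the end.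
import Mathlib
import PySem

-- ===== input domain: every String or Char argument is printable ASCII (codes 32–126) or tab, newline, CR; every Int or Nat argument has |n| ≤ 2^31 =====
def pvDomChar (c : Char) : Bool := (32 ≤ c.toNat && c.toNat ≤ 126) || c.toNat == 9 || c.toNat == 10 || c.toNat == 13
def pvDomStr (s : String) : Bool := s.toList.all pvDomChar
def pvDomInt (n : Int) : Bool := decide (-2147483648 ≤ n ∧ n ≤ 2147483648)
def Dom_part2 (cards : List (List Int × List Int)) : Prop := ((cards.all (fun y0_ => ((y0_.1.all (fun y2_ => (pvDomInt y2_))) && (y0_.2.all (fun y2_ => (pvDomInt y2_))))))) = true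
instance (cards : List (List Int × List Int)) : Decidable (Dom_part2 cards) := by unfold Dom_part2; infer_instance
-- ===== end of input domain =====

-- B replaces A's memoized top-down recursion (closure + dict) by a backward iterative DP
-- over a plain array, summed at the end: same values, simpler decomposition.

-- ===== PORT A =====
-- process_card(index) with its memo dict `counts`, threaded as state; the Python
-- recursion raises IndexError on `cards[index]` out of range (excluded by Pre_),
-- the fuel-0 branch only totalizes the recursion and is unreachable from part2.
mutual
def pvProcessA (cards : List (List Int × List Int)) :
    Nat → Nat → PySem.Dict Nat Int → Int × PySem.Dict Nat Int
  | 0, _, counts => (0, counts)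
  | gas + 1, index, counts =>
    match counts.get? index with
    | some c => (c, counts)                       -- if index in counts: return counts[index]
    | none =>
      match cards[index]? with
      | none => (0, counts)                       -- Python: IndexError (outside Pre_)
      | some (w, p) =>
        let nmatches := (PySem.Set.inter w p).length   -- len(winning & present)
        let r := pvLoopA cards gas (List.range nmatches) index 1 counts
        (r.1, r.2.insert index r.1)               -- counts[index] = count; return count
termination_by gas _ _ => (gas, 0)

def pvLoopA (cards : List (List Int × List Int)) :
    Nat → List Nat → Nat → Int → PySem.Dict Nat Int → Int × PySem.Dict Nat Int
  | _, [], _, count, counts => (count, counts)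
  | gas, i :: rest, index, count, counts =>       -- for i in range(nmatches): count += process_card(index+i+1)
    let r := pvProcessA cards gas (index + i + 1) counts
    pvLoopA cards gas rest index (count + r.1) r.2
termination_by gas l _ _ _ => (gas, l.length + 1)
end

def part2 (cards : List (List Int × List Int)) : Int :=
  let counts := (List.range cards.length).foldl
      (fun counts i => (pvProcessA cards (cards.length + 1) i counts).2)
      PySem.Dict.empty                            -- for i in range(len(cards)): process_card(i)
  (PySem.Dict.values counts).sum                  -- sum(counts.values()) — order-insensitive

-- ===== PORT B =====
-- Backward DP: totals[i] = cards produced by one copy of card i; summed at the end.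
def part2_alt (cards : List (List Int × List Int)) : Int :=
  let n := cards.length
  let totals0 := List.replicate n (0 : Int)       -- totals = [0] * n
  let totals := (List.range n).reverse.foldl      -- for i in range(n-1, -1, -1):
    (fun totals i =>
      match cards[i]? with
      | none => totals                            -- unreachable: i < n
      | some (w, p) =>
        let nmatches := (PySem.Set.inter w p).length
        let total := (List.range nmatches).foldl   -- for k in range(nmatches): total += totals[i+k+1]
            (fun total (k : Nat) => total + PySem.List.pyGetD totals ((i : Int) + (k : Int) + 1) 0) 1
        PySem.List.pySetD totals (i : Int) total) -- totals[i] = total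
    totals0
  totals.sum

-- ===== PRECONDITION & SPEC =====
-- number of matches of card i (0 out of range); used only by Pre_ and the proofs
def pvMatches (cards : List (List Int × List Int)) (i : Nat) : Nat :=
  match cards[i]? with
  | some (w, p) => (PySem.Set.inter w p).length
  | none => 0

-- Pre_ excludes exactly the inputs on which both Pythons raise IndexError:
-- some card's nmatches run past the end of the list.
def Pre_part2 (cards : List (List Int × List Int)) : Prop :=
  ∀ i, i < cards.length → i + pvMatches cards i < cards.length

instance (cards : List (List Int × List Int)) : Decidable (Pre_part2 cards) := by
  unfold Pre_part2; infer_instance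

def pvWitness_part2 : (List (List Int × List Int)) := [([1], [1, 2]), ([3], [])]

def Spec_part2 (cards : List (List Int × List Int)) (out : Int) : Prop := out = part2_alt cards
instance (cards : List (List Int × List Int)) (out : Int) : Decidable (Spec_part2 cards out) := by
  unfold Spec_part2; infer_instance

-- ===== CLAIM (what is proved, stated in full; the proofs are below) =====
def Claim_equal_part2 : Prop := ∀ (cards : List (List Int × List Int)), Dom_part2 cards → Pre_part2 cards → Spec_part2 cards (part2 cards)

-- ===== LEMMAS AND PROOFS =====

-- the card-count recurrence both programs compute: v i = 1 + Σ_{k < nmatches i} v (i+k+1)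
def pvV (cards : List (List Int × List Int)) (i : Nat) : Int :=
  if _h : i < cards.length then
    1 + ((List.range (pvMatches cards i)).attach.map (fun k => pvV cards (i + k.1 + 1))).sum
  else 0
termination_by cards.length - i
decreasing_by omega

theorem pvV_eq (cards : List (List Int × List Int)) (i : Nat) (h : i < cards.length) :
    pvV cards i = 1 + ((List.range (pvMatches cards i)).map (fun k => pvV cards (i + k + 1))).sum := by
  rw [pvV]
  simp [h]

theorem pvV_of_ge (cards : List (List Int × List Int)) (i : Nat) (h : ¬ i < cards.length) :
    pvV cards i = 0 := by
  rw [pvV]; simp [h]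

-- the memo invariant of A's dict
def pvInv (cards : List (List Int × List Int)) (d : PySem.Dict Nat Int) : Prop :=
  (PySem.Dict.keys d).Nodup ∧
  ∀ k c, PySem.Dict.get? d k = some c → k < cards.length ∧ c = pvV cards k

theorem pvProcessA_correct (cards : List (List Int × List Int)) (hpre : Pre_part2 cards) :
    ∀ gas index (d : PySem.Dict Nat Int), cards.length - index < gas → pvInv cards d →
      (pvProcessA cards gas index d).1 = pvV cards index ∧
      pvInv cards (pvProcessA cards gas index d).2 ∧
      (∀ k c, PySem.Dict.get? d k = some c →
        PySem.Dict.get? (pvProcessA cards gas index d).2 k = some c) ∧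
      (index < cards.length → (PySem.Dict.get? (pvProcessA cards gas index d).2 index).isSome) := by
  intro gas
  induction gas with
  | zero => intro index d h _; exact absurd h (Nat.not_lt_zero _)
  | succ gas ih =>
    intro index d hgas hinv
    have loop : ∀ ks (count : Int) (d' : PySem.Dict Nat Int),
        (∀ k ∈ ks, cards.length - (index + k + 1) < gas) → pvInv cards d' →
        (pvLoopA cards gas ks index count d').1
            = count + (ks.map (fun k => pvV cards (index + k + 1))).sum ∧
        pvInv cards (pvLoopA cards gas ks index count d').2 ∧
        (∀ k c, PySem.Dict.get? d' k = some c →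
          PySem.Dict.get? (pvLoopA cards gas ks index count d').2 k = some c) := by
      intro ks
      induction ks with
      | nil =>
        intro count d' _ hi
        simp only [pvLoopA]
        exact ⟨by simp, hi, fun k c h => h⟩
      | cons k rest ihk =>
        intro count d' hfuel hi
        obtain ⟨h1, h2, h3, _⟩ := ih (index + k + 1) d' (hfuel k (by simp)) hi
        obtain ⟨g1, g2, g3⟩ := ihk (count + (pvProcessA cards gas (index + k + 1) d').1)
          (pvProcessA cards gas (index + k + 1) d').2
          (fun k' hk' => hfuel k' (by simp [hk'])) h2
        refine ⟨?_, by simpa [pvLoopA] using g2, fun k' c hc => ?_⟩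
        · simp only [pvLoopA]
          rw [g1, h1]
          simp [add_assoc]
        · simpa [pvLoopA] using g3 _ _ (h3 _ _ hc)
    cases hmem : PySem.Dict.get? d index with
    | some c =>
      have hc := (hinv.2 index c hmem)
      refine ⟨?_, ?_, ?_, ?_⟩ <;> simp only [pvProcessA, hmem] <;>
        first
          | exact hc.2
          | exact hinv
          | exact fun k c' h => h
          | exact fun _ => by simp [hmem]
    | none =>
      cases hget : cards[index]? with
      | none =>
        have hge : cards.length ≤ index := by
          by_contra h
          push_neg at h
          rw [List.getElem?_eq_getElem h] at hget
          cases hget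
        refine ⟨?_, ?_, ?_, ?_⟩ <;> simp only [pvProcessA, hmem, hget] <;>
          first
            | exact (pvV_of_ge cards index (by omega)).symm
            | exact hinv
            | exact fun k c h => h
            | exact fun h => absurd h (by omega)
      | some wp =>
        obtain ⟨w, p⟩ := wp
        have hlt : index < cards.length := by
          by_contra h
          push_neg at h
          rw [List.getElem?_eq_none h] at hget
          cases hget
        have hm : (PySem.Set.inter w p).length = pvMatches cards index := by
          simp [pvMatches, hget]
        have hfuel : ∀ k ∈ List.range (PySem.Set.inter w p).length,
            cards.length - (index + k + 1) < gas := by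
          intro k hk
          rw [List.mem_range, hm] at hk
          have := hpre index hlt
          omega
        obtain ⟨l1, l2, l3⟩ := loop (List.range (PySem.Set.inter w p).length) 1 d hfuel hinv
        have hval : (pvLoopA cards gas (List.range (PySem.Set.inter w p).length) index 1 d).1
            = pvV cards index := by
          rw [l1, pvV_eq cards index hlt, hm]
        refine ⟨?_, ⟨?_, ?_⟩, ?_, ?_⟩ <;> simp only [pvProcessA, hmem, hget]
        · exact hval
        · exact PySem.Dict.nodup_keys_insert _ _ _ l2.1
        · intro k c hc
          rw [PySem.Dict.get?_insert] at hc
          by_cases hk : k = index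
          · rw [if_pos hk] at hc
            cases hc
            subst hk
            exact ⟨hlt, hval.symm ▸ rfl⟩
          · rw [if_neg hk] at hc
            exact l2.2 k c hc
        · intro k c hc
          have hne : k ≠ index := by
            intro he
            rw [he, hmem] at hc
            cases hc
          rw [PySem.Dict.get?_insert_of_ne _ _ hne]
          exact l3 _ _ hc
        · intro _
          simp [PySem.Dict.get?_insert]

theorem part2_eq_sum (cards : List (List Int × List Int)) (hpre : Pre_part2 cards) :
    part2 cards = ((List.range cards.length).map (pvV cards)).sum := by
  have fold : ∀ (l : List Nat) (d : PySem.Dict Nat Int), pvInv cards d →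
      pvInv cards (l.foldl (fun d i => (pvProcessA cards (cards.length + 1) i d).2) d) ∧
      (∀ k c, PySem.Dict.get? d k = some c →
        PySem.Dict.get? (l.foldl (fun d i => (pvProcessA cards (cards.length + 1) i d).2) d) k
          = some c) ∧
      (∀ i ∈ l, i < cards.length →
        (PySem.Dict.get? (l.foldl (fun d i => (pvProcessA cards (cards.length + 1) i d).2) d) i).isSome) := by
    intro l
    induction l with
    | nil => intro d hi; exact ⟨hi, fun k c h => h, by simp⟩
    | cons i rest ihl =>
      intro d hi
      obtain ⟨_, h2, h3, h4⟩ := pvProcessA_correct cards hpre (cards.length + 1) i d (by omega) hi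
      obtain ⟨g1, g2, g3⟩ := ihl (pvProcessA cards (cards.length + 1) i d).2 h2
      simp only [List.foldl_cons]
      refine ⟨g1, fun k c hc => g2 _ _ (h3 _ _ hc), ?_⟩
      intro j hj hjlt
      rcases List.mem_cons.mp hj with he | hm
      · subst he
        obtain ⟨c, hc⟩ := Option.isSome_iff_exists.mp (h4 hjlt)
        exact Option.isSome_iff_exists.mpr ⟨c, g2 _ _ hc⟩
      · exact g3 j hm hjlt
  have main : ∀ D : PySem.Dict Nat Int, pvInv cards D →
      (∀ k, k < cards.length → (PySem.Dict.get? D k).isSome) →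
      (PySem.Dict.values D).sum = ((List.range cards.length).map (pvV cards)).sum := by
    intro D hinv hall
    have hmemiff : ∀ k : Nat, k ∈ PySem.Dict.keys D ↔ k < cards.length := by
      intro k
      constructor
      · intro hk
        have hc : D.contains k = true := (PySem.Dict.contains_iff_mem_keys D k).mpr hk
        rw [PySem.Dict.contains_eq_isSome_get?] at hc
        obtain ⟨c, hc⟩ := Option.isSome_iff_exists.mp hc
        exact (hinv.2 k c hc).1
      · intro hk
        have hc : D.contains k = true := by
          rw [PySem.Dict.contains_eq_isSome_get?]; exact hall k hk
        exact (PySem.Dict.contains_iff_mem_keys D k).mp hc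
    have hperm : (PySem.Dict.keys D).Perm (List.range cards.length) :=
      (List.perm_ext_iff_of_nodup hinv.1 List.nodup_range).mpr
        (fun a => by rw [hmemiff, List.mem_range])
    have hvals : PySem.Dict.values D = (PySem.Dict.keys D).map (pvV cards) := by
      rw [PySem.Dict.values_eq_map_keys D hinv.1 0]
      apply List.map_congr_left
      intro k hk
      have hc : D.contains k = true := (PySem.Dict.contains_iff_mem_keys D k).mpr hk
      rw [PySem.Dict.contains_eq_isSome_get?] at hc
      obtain ⟨c, hc⟩ := Option.isSome_iff_exists.mp hc
      rw [PySem.Dict.getD_of_get?_eq_some D 0 hc]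
      exact (hinv.2 k c hc).2
    rw [hvals]
    exact List.Perm.sum_eq (hperm.map (pvV cards))
  have hempty : pvInv cards PySem.Dict.empty :=
    ⟨PySem.Dict.nodup_keys_empty, by
      intro k c h; rw [PySem.Dict.get?_empty] at h; cases h⟩
  obtain ⟨hinv, _, hall⟩ := fold (List.range cards.length) PySem.Dict.empty hempty
  exact main _ hinv (fun k hk => hall k (List.mem_range.mpr hk) hk)

theorem part2_alt_eq_sum (cards : List (List Int × List Int)) (hpre : Pre_part2 cards) :
    part2_alt cards = ((List.range cards.length).map (pvV cards)).sum := by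
  have main : ∀ i, i ≤ cards.length → ∀ t : List Int, t.length = cards.length →
      (∀ j, i ≤ j → j < cards.length → t.getD j 0 = pvV cards j) →
      (((List.range i).reverse.foldl
          (fun totals i =>
            match cards[i]? with
            | none => totals
            | some (w, p) =>
              PySem.List.pySetD totals (i : Int)
                ((List.range (PySem.Set.inter w p).length).foldl
                  (fun total (k : Nat) => total + PySem.List.pyGetD totals ((i : Int) + (k : Int) + 1) 0)
                  1)) t).length = cards.length ∧
       ∀ j, j < cards.length →
         ((List.range i).reverse.foldl
          (fun totals i =>
            match cards[i]? with
            | none => totals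
            | some (w, p) =>
              PySem.List.pySetD totals (i : Int)
                ((List.range (PySem.Set.inter w p).length).foldl
                  (fun total (k : Nat) => total + PySem.List.pyGetD totals ((i : Int) + (k : Int) + 1) 0)
                  1)) t).getD j 0 = pvV cards j) := by
    intro i
    induction i with
    | zero =>
      intro _ t ht hjs
      simpa using ⟨ht, fun j hj => hjs j (Nat.zero_le _) hj⟩
    | succ i ihi =>
      intro hle t ht hjs
      have hi : i < cards.length := hle
      have hrev : (List.range (i + 1)).reverse = i :: (List.range i).reverse := by
        rw [List.range_succ, List.reverse_append]; simp
      rw [hrev, List.foldl_cons]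
      have hget : cards[i]? = some cards[i] := List.getElem?_eq_getElem hi
      rcases hcp : cards[i] with ⟨w, p⟩
      have hm : (PySem.Set.inter w p).length = pvMatches cards i := by
        simp [pvMatches, hget, hcp]
      have htot : (List.range (PySem.Set.inter w p).length).foldl
          (fun total (k : Nat) => total + PySem.List.pyGetD t ((i : Int) + (k : Int) + 1) 0) 1
          = pvV cards i := by
        rw [PySem.List.foldl_add, pvV_eq cards i hi, ← hm]
        congr 1
        refine congrArg List.sum (List.map_congr_left ?_)
        intro k hk
        rw [List.mem_range] at hk
        have hk2 : i + k + 1 < cards.length := by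
          have := hpre i hi
          rw [hm] at hk
          omega
        have hcast : (i : Int) + (k : Int) + 1 = ((i + k + 1 : Nat) : Int) := by push_cast; ring
        rw [hcast, PySem.List.pyGetD_natCast]
        exact hjs (i + k + 1) (by omega) hk2
      have hstep :
          (match cards[i]? with
            | none => t
            | some (w, p) =>
              PySem.List.pySetD t (i : Int)
                ((List.range (PySem.Set.inter w p).length).foldl
                  (fun total (k : Nat) => total + PySem.List.pyGetD t ((i : Int) + (k : Int) + 1) 0)
                  1))
          = t.set i (pvV cards i) := by
        rw [hget, hcp]
        show PySem.List.pySetD t (i : Int)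
            ((List.range (PySem.Set.inter w p).length).foldl
              (fun total (k : Nat) => total + PySem.List.pyGetD t ((i : Int) + (k : Int) + 1) 0) 1)
          = t.set i (pvV cards i)
        rw [htot, PySem.List.pySetD_natCast]
      rw [hstep]
      apply ihi (Nat.le_of_succ_le hle)
      · simp [ht]
      · intro j hij hj
        rcases eq_or_ne j i with he | hne
        · subst he
          rw [List.getD_eq_getElem?_getD, List.getElem?_set]
          simp [ht, hi]
        · rw [List.getD_eq_getElem?_getD, List.getElem?_set, if_neg (fun h => hne h.symm),
            ← List.getD_eq_getElem?_getD]
          exact hjs j (by omega) hj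
  obtain ⟨hlen, hvals⟩ := main cards.length le_rfl (List.replicate cards.length (0 : Int))
    (by simp) (fun j hj hjn => absurd hjn (by omega))
  have hfin : (List.range cards.length).reverse.foldl
      (fun totals i =>
        match cards[i]? with
        | none => totals
        | some (w, p) =>
          PySem.List.pySetD totals (i : Int)
            ((List.range (PySem.Set.inter w p).length).foldl
              (fun total (k : Nat) => total + PySem.List.pyGetD totals ((i : Int) + (k : Int) + 1) 0)
              1)) (List.replicate cards.length (0 : Int))
      = (List.range cards.length).map (pvV cards) := by
    apply List.ext_getElem (by rw [hlen]; simp)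
    intro j h1 h2
    have hj : j < cards.length := by simpa using h2
    have := hvals j hj
    rw [List.getD_eq_getElem?_getD, List.getElem?_eq_getElem h1] at this
    simpa [hj] using this
  show ((List.range cards.length).reverse.foldl
      (fun totals i =>
        match cards[i]? with
        | none => totals
        | some (w, p) =>
          PySem.List.pySetD totals (i : Int)
            ((List.range (PySem.Set.inter w p).length).foldl
              (fun total (k : Nat) => total + PySem.List.pyGetD totals ((i : Int) + (k : Int) + 1) 0)
              1)) (List.replicate cards.length (0 : Int))).sum
    = ((List.range cards.length).map (pvV cards)).sum
  rw [hfin]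

-- ===== VERDICT (by name: the statement is the Claim_ definition above) =====
theorem part2_spec : Claim_equal_part2 := by
  intro cards _ hpre
  unfold Spec_part2
  rw [part2_eq_sum cards hpre, part2_alt_eq_sum cards hpre]
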